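-- pv_equiv track=rewrite | github.com/imnderoo/m_s_p | miseq_pipe/scripts/python_modules/vcreports/parser.py | parseAndFilterInfoValues
-- ===== SOURCE A (Python) =====
-- def parseAndFilterInfoValues(infoCol, interestedInfoFields):
--
-- 	infoDict = dict.fromkeys(interestedInfoFields, "NA") # Dictionary
--
-- 	infoArray= infoCol.split(';')
--
-- 	for idx in enumerate(infoArray):
-- 		num = idx[0]
-- 		value = idx[1]
--
-- 		if "=" in value:
-- 			infoHeader = value.split('=')[0]
-- 			infoVal = value.split('=')[1]
--
-- 			if infoHeader in infoDict:
-- 				infoDict[infoHeader] = infoVal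
--
-- 		"""
-- 			"QD" in infoHeader: # quality score divided by total depth. PASS: QD > 2.0
-- 			"BaseQRankSum" in infoHeader:
-- 			"DP" in infoHeader: # Total depth of reads. PASS: DP > 20
-- 			"HaplotypeScore"
-- 			"ReadPosRankSum" in infoHeader: # Chance of it being FP cuz it's end of reads. ReadPosRankSum > -8
-- 			"MQ" in infoHeader: # Mapping Quality. MQ > 30
-- 			"VQSLOD" in infoHeader: # log odd ratios of it being a true variants.
-- 			"SB" in infoHeader: #Strand bias: higher = higher bias (Flag if value is >=0?)
-- 			"FS" in infoHeader: #Fisher Strand: Indication of strand bias. FS < 60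
-- 		"""
--
-- 	return infoDict
-- ===== SOURCE B (Python) =====
-- def parseAndFilterInfoValues(infoCol, interestedInfoFields):
-- 	segments = infoCol.split(';')
--
-- 	def lookup(f):
-- 		# last write wins in A's dict, so the last matching segment decides
-- 		for seg in reversed(segments):
-- 			if "=" in seg and seg.split('=')[0] == f:
-- 				return seg.split('=')[1]
-- 		return "NA"
--
-- 	return {f: lookup(f) for f in interestedInfoFields}
-- ===== Notes on version B (the rewrite author's own statement) =====
-- stated objective: alternative
-- what changed: A streams the segments once, updating a pre-filled NA dict in place; B keeps no table at all: for each interested field it scans the segment list backwards and returns the first (= overall last) matching key=value, which equals A's last-write-wins update.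
import Mathlib
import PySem

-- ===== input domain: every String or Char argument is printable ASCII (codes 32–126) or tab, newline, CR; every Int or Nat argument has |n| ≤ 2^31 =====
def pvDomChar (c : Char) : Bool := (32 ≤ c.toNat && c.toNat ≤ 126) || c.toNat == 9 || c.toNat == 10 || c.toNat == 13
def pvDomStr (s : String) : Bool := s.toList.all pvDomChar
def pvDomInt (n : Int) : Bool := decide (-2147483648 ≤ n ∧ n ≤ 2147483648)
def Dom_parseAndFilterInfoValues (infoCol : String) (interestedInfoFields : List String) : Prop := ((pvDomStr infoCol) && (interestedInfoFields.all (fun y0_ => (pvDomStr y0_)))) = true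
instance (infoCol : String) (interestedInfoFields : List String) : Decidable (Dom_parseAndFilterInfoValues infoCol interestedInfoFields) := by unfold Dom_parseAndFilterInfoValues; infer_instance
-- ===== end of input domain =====

-- B replaces A's streaming dict update by a per-field backwards search over the segments (no table at all): alternative decomposition, same result.

-- ===== PORT A =====
-- loop body of A's 'for idx in enumerate(infoArray)' (num = idx[0] is computed but unused; value = idx[1])
-- the [0]/[1] indexing uses pyGetD: inside the '"=" in value' guard the split always has ≥ 2 pieces, so Python never raises here
def pvStepA (d : PySem.Dict String String) (value : String) : PySem.Dict String String :=
  if PySem.Str.isIn "=" value then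
    let infoHeader := PySem.List.pyGetD ((PySem.Str.split? value "=").getD []) (0 : Int) ""
    let infoVal := PySem.List.pyGetD ((PySem.Str.split? value "=").getD []) (1 : Int) ""
    if d.contains infoHeader then d.insert infoHeader infoVal else d
  else d

def parseAndFilterInfoValues (infoCol : String) (interestedInfoFields : List String) : List (String × String) :=
  -- dict.fromkeys(interestedInfoFields, "NA")
  let infoDict : PySem.Dict String String :=
    interestedInfoFields.foldl (fun d k => d.insert k "NA") PySem.Dict.empty
  -- infoCol.split(';') — split? is none only for an empty separator, and ";" ≠ ""
  let infoArray := (PySem.Str.split? infoCol ";").getD []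
  ((PySem.List.enumerate infoArray 0).foldl (fun d idx => pvStepA d idx.2) infoDict).items

-- ===== PORT B =====
-- B's inner 'for seg in reversed(segments)' loop: first match in the reversed list wins, else "NA"
def pvLookupB (rsegs : List String) (f : String) : String :=
  match rsegs with
  | [] => "NA"
  | seg :: rest =>
    if PySem.Str.isIn "=" seg
        && PySem.List.pyGetD ((PySem.Str.split? seg "=").getD []) (0 : Int) "" == f then
      PySem.List.pyGetD ((PySem.Str.split? seg "=").getD []) (1 : Int) ""
    else pvLookupB rest f

def parseAndFilterInfoValues_alt (infoCol : String) (interestedInfoFields : List String) : List (String × String) :=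
  let segments := (PySem.Str.split? infoCol ";").getD []
  -- {f: lookup(f) for f in interestedInfoFields}
  (interestedInfoFields.foldl
    (fun d f => d.insert f (pvLookupB segments.reverse f)) PySem.Dict.empty).items

-- ===== PRECONDITION & SPEC =====
def Spec_parseAndFilterInfoValues (infoCol : String) (interestedInfoFields : List String) (out : List (String × String)) : Prop := out = parseAndFilterInfoValues_alt infoCol interestedInfoFields
instance (infoCol : String) (interestedInfoFields : List String) (out : List (String × String)) : Decidable (Spec_parseAndFilterInfoValues infoCol interestedInfoFields out) := by unfold Spec_parseAndFilterInfoValues; infer_instance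

-- ===== CLAIM (what is proved, stated in full; the proofs are below) =====
def Claim_equal_parseAndFilterInfoValues : Prop := ∀ (infoCol : String) (interestedInfoFields : List String), Dom_parseAndFilterInfoValues infoCol interestedInfoFields → Spec_parseAndFilterInfoValues infoCol interestedInfoFields (parseAndFilterInfoValues infoCol interestedInfoFields)

-- ===== LEMMAS AND PROOFS =====

-- proof-side helper: first matching segment's value in a list, as an Option
def pvScan? (rsegs : List String) (f : String) : Option String :=
  match rsegs with
  | [] => none
  | seg :: rest =>
    if PySem.Str.isIn "=" seg
        && PySem.List.pyGetD ((PySem.Str.split? seg "=").getD []) (0 : Int) "" == f then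
      some (PySem.List.pyGetD ((PySem.Str.split? seg "=").getD []) (1 : Int) "")
    else pvScan? rest f

theorem pvLookupB_eq_scan (rsegs : List String) (f : String) :
    pvLookupB rsegs f = (pvScan? rsegs f).getD "NA" := by
  induction rsegs with
  | nil => rfl
  | cons s t ih =>
    simp only [pvLookupB, pvScan?]
    split
    · rfl
    · exact ih

theorem pvScan?_append (l l' : List String) (f : String) :
    pvScan? (l ++ l') f = (pvScan? l f).or (pvScan? l' f) := by
  induction l with
  | nil => rfl
  | cons s t ih =>
    simp only [List.cons_append, pvScan?]
    split
    · rfl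
    · exact ih

-- a fold inserting values that do not depend on the accumulator: last write wins, missing keys keep their old value
theorem pv_getD_foldl_insert_const (l : List String) (v : String → String)
    (d : PySem.Dict String String) (f : String) :
    (l.foldl (fun d k => d.insert k (v k)) d).getD f "NA"
      = if f ∈ l then v f else d.getD f "NA" := by
  induction l generalizing d with
  | nil => simp
  | cons x t ih =>
    simp only [List.foldl_cons, ih]
    by_cases hft : f ∈ t
    · simp [hft, List.mem_cons]
    · by_cases hfx : f = x
      · subst hfx
        simp [hft, PySem.Dict.getD_insert_self]
      · simp [hft, hfx, PySem.Dict.getD_insert_of_ne _ _ _ hfx]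

-- A's loop never adds or removes keys
theorem pv_stepA_keys (d : PySem.Dict String String) (value : String) :
    (pvStepA d value).keys = d.keys := by
  simp only [pvStepA]
  split
  · split
    · next hc => exact PySem.Dict.keys_insert_of_contains _ _ hc
    · rfl
  · rfl

theorem pv_foldA_keys (segs : List String) (d : PySem.Dict String String) :
    (segs.foldl pvStepA d).keys = d.keys := by
  induction segs generalizing d with
  | nil => rfl
  | cons s t ih => simp only [List.foldl_cons, ih, pv_stepA_keys]

-- the value A's fold leaves at a key it started with is the last matching segment's value
theorem pv_foldA_getD (segs : List String) (d : PySem.Dict String String) (f : String)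
    (hc : d.contains f = true) :
    (segs.foldl pvStepA d).getD f "NA"
      = (pvScan? segs.reverse f).getD (d.getD f "NA") := by
  induction segs generalizing d with
  | nil => rfl
  | cons s t ih =>
    have hc' : (pvStepA d s).contains f = true := by
      rw [PySem.Dict.contains_iff_mem_keys] at hc ⊢
      rw [pv_stepA_keys]; exact hc
    simp only [List.foldl_cons, List.reverse_cons, pvScan?_append, ih _ hc']
    have hstep : (pvStepA d s).getD f "NA"
        = (pvScan? [s] f).getD (d.getD f "NA") := by
      simp only [pvStepA, pvScan?]
      by_cases hin : PySem.Str.isIn "=" s = true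
      · by_cases hf : PySem.List.pyGetD ((PySem.Str.split? s "=").getD []) (0 : Int) "" = f
        · rw [if_pos hin, hf, if_pos hc, PySem.Dict.getD_insert_self,
            if_pos (show (PySem.Str.isIn "=" s && (f == f)) = true by simp; exact hin)]
          rfl
        · have hne : f ≠ PySem.List.pyGetD ((PySem.Str.split? s "=").getD []) (0 : Int) "" :=
            fun h => hf h.symm
          rw [if_pos hin,
            if_neg (show ¬ (PySem.Str.isIn "=" s
              && (PySem.List.pyGetD ((PySem.Str.split? s "=").getD []) (0 : Int) "" == f)) = true by
                simp [hf])]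
          simp only [Option.getD_none]
          split
          · rw [PySem.Dict.getD_insert_of_ne _ _ _ hne]
          · rfl
      · rw [if_neg hin,
          if_neg (show ¬ (PySem.Str.isIn "=" s
            && (PySem.List.pyGetD ((PySem.Str.split? s "=").getD []) (0 : Int) "" == f)) = true by
              simp; exact fun h => absurd h hin)]
        rfl
    rw [hstep]
    cases h : pvScan? t.reverse f with
    | none => simp [Option.or]
    | some v => simp [Option.or]

-- ===== VERDICT (by name: the statement is the Claim_ definition above) =====
theorem parseAndFilterInfoValues_spec : Claim_equal_parseAndFilterInfoValues := by
  intro infoCol interested _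
  unfold Spec_parseAndFilterInfoValues parseAndFilterInfoValues parseAndFilterInfoValues_alt
  simp only []
  set segs := (PySem.Str.split? infoCol ";").getD [] with hsegs
  set d0 : PySem.Dict String String :=
    interested.foldl (fun d k => d.insert k "NA") PySem.Dict.empty with hd0
  set dB : PySem.Dict String String :=
    interested.foldl (fun d f => d.insert f (pvLookupB segs.reverse f)) PySem.Dict.empty with hdB
  have henum : (PySem.List.enumerate segs 0).foldl (fun d idx => pvStepA d idx.2) d0
      = segs.foldl pvStepA d0 := by
    conv_rhs => rw [← PySem.List.map_snd_enumerate segs 0]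
    rw [List.foldl_map]
  rw [henum]
  set dA := segs.foldl pvStepA d0 with hdA
  have hkd0 : d0.keys = PySem.Set.ofList interested := by
    rw [hd0, PySem.Dict.keys_foldl_insert interested (fun _ _ => "NA"),
      PySem.Dict.keys_empty, PySem.Set.update_nil_left]
  have hfoldkeys : dA.keys = d0.keys := by
    rw [hdA]; exact pv_foldA_keys segs d0
  have hkA : dA.keys = PySem.Set.ofList interested := by rw [hfoldkeys, hkd0]
  have hkB : dB.keys = PySem.Set.ofList interested := by
    rw [hdB, PySem.Dict.keys_foldl_insert interested (fun _ f => pvLookupB segs.reverse f),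
      PySem.Dict.keys_empty, PySem.Set.update_nil_left]
  have hndA : dA.keys.Nodup := by rw [hkA]; exact PySem.Set.nodup_ofList interested
  have hndB : dB.keys.Nodup := by rw [hkB]; exact PySem.Set.nodup_ofList interested
  rw [PySem.Dict.items_eq_map_keys dA hndA "NA", PySem.Dict.items_eq_map_keys dB hndB "NA",
    hkA, hkB]
  apply List.map_congr_left
  intro k hk
  have hkmem : k ∈ interested := (PySem.Set.mem_ofList interested k).mp hk
  have hck : d0.contains k = true := by
    rw [PySem.Dict.contains_iff_mem_keys, hkd0]; exact hk
  have hv0 : d0.getD k "NA" = "NA" := by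
    rw [hd0, pv_getD_foldl_insert_const interested (fun _ => "NA")]
    simp [hkmem]
  have hA : dA.getD k "NA" = (pvScan? segs.reverse k).getD "NA" := by
    rw [hdA, pv_foldA_getD segs d0 k hck, hv0]
  have hB : dB.getD k "NA" = pvLookupB segs.reverse k := by
    rw [hdB, pv_getD_foldl_insert_const interested (fun f => pvLookupB segs.reverse f)]
    simp [hkmem]
  rw [hA, hB, pvLookupB_eq_scan]
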